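-- pv_equiv track=rewrite | github.com/yasheng-chen/unet_ich_edema | util.py | unet_dim_calculator
-- ===== SOURCE A (Python) =====
-- def unet_dim_calculator(min_size, n_layers):
--     input_size = min_size
--     output_size = min_size
--
--     for i in range(n_layers-1):
--         input_size = 2*(input_size + 4)
--         output_size = 2*output_size - 4
--
--     input_size += 4
--
--     return input_size, output_size
-- ===== SOURCE B (Python) =====
-- def unet_dim_calculator(min_size, n_layers):
--     e = max(n_layers - 1, 0)
--     return (2 ** e) * (min_size + 8) - 4, (2 ** e) * (min_size - 4) + 4
-- ===== Notes on version B (the rewrite author's own statement) =====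
-- stated objective: alternative
-- what changed: Replaced the per-layer loop with the closed forms input = 2^e*(min_size+8)-4 and output = 2^e*(min_size-4)+4 where e = max(n_layers-1, 0), derived from the fixed points of the two affine recurrences.
import Mathlib
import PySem

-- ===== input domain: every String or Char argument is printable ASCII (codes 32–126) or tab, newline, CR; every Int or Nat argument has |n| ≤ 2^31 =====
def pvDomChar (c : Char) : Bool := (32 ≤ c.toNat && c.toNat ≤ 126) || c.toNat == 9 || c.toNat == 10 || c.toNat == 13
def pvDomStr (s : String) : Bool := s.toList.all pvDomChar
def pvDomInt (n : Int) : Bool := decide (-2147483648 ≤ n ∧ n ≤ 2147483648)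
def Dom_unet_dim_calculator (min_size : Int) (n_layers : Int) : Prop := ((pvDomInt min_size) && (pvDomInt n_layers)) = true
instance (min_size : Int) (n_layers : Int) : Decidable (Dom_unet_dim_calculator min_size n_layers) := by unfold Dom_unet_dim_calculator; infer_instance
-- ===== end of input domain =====

-- B replaces A's per-layer loop by the closed form of the two affine recurrences (objective: alternative — pure arithmetic instead of iteration).

-- ===== PORT A =====
def unet_dim_calculator (min_size : Int) (n_layers : Int) : Int × Int :=
  let st := (PySem.List.pyRange 0 (n_layers - 1) 1).foldl
    (fun (p : Int × Int) _ => (2 * (p.1 + 4), 2 * p.2 - 4)) (min_size, min_size)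
  (st.1 + 4, st.2)

-- ===== PORT B =====
def unet_dim_calculator_alt (min_size : Int) (n_layers : Int) : Int × Int :=
  let e := (max (n_layers - 1) 0).toNat
  ((2 ^ e) * (min_size + 8) - 4, (2 ^ e) * (min_size - 4) + 4)

-- ===== PRECONDITION & SPEC =====
def Spec_unet_dim_calculator (min_size : Int) (n_layers : Int) (out : Int × Int) : Prop := out = unet_dim_calculator_alt min_size n_layers
instance (min_size : Int) (n_layers : Int) (out : Int × Int) : Decidable (Spec_unet_dim_calculator min_size n_layers out) := by unfold Spec_unet_dim_calculator; infer_instance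

-- ===== CLAIM (what is proved, stated in full; the proofs are below) =====
def Claim_equal_unet_dim_calculator : Prop := ∀ (min_size : Int) (n_layers : Int), Dom_unet_dim_calculator min_size n_layers → Spec_unet_dim_calculator min_size n_layers (unet_dim_calculator min_size n_layers)

-- ===== LEMMAS AND PROOFS =====

-- Invariant of A's loop: after e iterations the state is the closed form.
theorem unet_loop_closed (l : List Int) (x y : Int) :
    l.foldl (fun (p : Int × Int) _ => (2 * (p.1 + 4), 2 * p.2 - 4)) (x, y)
      = ((2 ^ l.length) * (x + 8) - 8, (2 ^ l.length) * (y - 4) + 4) := by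
  induction l generalizing x y with
  | nil => simp
  | cons a t ih =>
    simp only [List.foldl_cons, ih, List.length_cons]
    simp only [Prod.mk.injEq]
    refine ⟨?_, ?_⟩ <;> (push_cast [pow_succ]; ring)

-- ===== VERDICT (by name: the statement is the Claim_ definition above) =====
theorem unet_dim_calculator_spec : Claim_equal_unet_dim_calculator := by
  intro m n _
  unfold Spec_unet_dim_calculator unet_dim_calculator unet_dim_calculator_alt
  simp only [unet_loop_closed, PySem.List.length_pyRange_one]
  have : (n - 1 - 0).toNat = (max (n - 1) 0).toNat := by omega
  rw [this]
  simp only [Prod.mk.injEq]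
  exact ⟨by ring, trivial⟩
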